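-- pv_equiv track=rewrite | github.com/dsweet99/dryer | test/benchmark_data/module_003.py | compute_3_8
-- ===== SOURCE A (Python) =====
-- def compute_3_8(a, b, c):
--     x = a * 76 + b * 97
--     y = c * 76 - a * 113
--     for i in range(16):
--         x = x + i * 18
--         y = y - i * 20
--         if x > 5380:
--             x = x % 1190
--     return x + y + 25
-- ===== SOURCE B (Python) =====
-- def compute_3_8(a, b, c):
--     # The modulo branch can fire at most once: right after it x < 1190, and the
--     # remaining additions total at most 2160, so x never exceeds 5380 again.
--     # So: find the first step i where x0 plus the prefix sum 9*i*(i+1)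
--     # (= sum of j*18 for j <= i) crosses 5380; everything else is closed form
--     # (y's loop updates sum to 20*120 = 2400, the remaining x additions to 2160 - s).
--     x0 = a * 76 + b * 97
--     y = c * 76 - a * 113 - 2400
--     for i in range(16):
--         s = 9 * i * (i + 1)
--         if x0 + s > 5380:
--             x = (x0 + s) % 1190 + (2160 - s)
--             break
--     else:
--         x = x0 + 2160
--     return x + y + 25
-- ===== Notes on version B (the rewrite author's own statement) =====
-- stated objective: alternative
-- what changed: B replaces the 16-step state simulation by closed forms: y's updates collapse to the constant 2400, and since the modulo branch can fire at most once B just searches for the first crossing index i (via the prefix sum 9*i*(i+1)) and computes x in closed form from it.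
import Mathlib
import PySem

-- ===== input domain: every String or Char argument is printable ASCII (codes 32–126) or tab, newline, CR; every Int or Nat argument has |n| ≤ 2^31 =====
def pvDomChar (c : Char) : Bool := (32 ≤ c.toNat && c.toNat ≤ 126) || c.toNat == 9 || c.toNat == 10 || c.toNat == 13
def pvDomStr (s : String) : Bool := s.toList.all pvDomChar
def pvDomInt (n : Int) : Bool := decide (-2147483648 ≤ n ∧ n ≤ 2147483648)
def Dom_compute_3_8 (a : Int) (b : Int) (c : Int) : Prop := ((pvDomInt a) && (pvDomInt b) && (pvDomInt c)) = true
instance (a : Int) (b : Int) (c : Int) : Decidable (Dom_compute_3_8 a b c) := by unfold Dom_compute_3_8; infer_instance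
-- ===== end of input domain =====

-- ===== PORT A =====
def compute_3_8 (a : Int) (b : Int) (c : Int) : Int :=
  let x := a * 76 + b * 97
  let y := c * 76 - a * 113
  let s := (PySem.List.pyRange 0 16 1).foldl
    (fun (s : Int × Int) i =>
      let x := s.1 + i * 18
      let y := s.2 - i * 20
      let x := if x > 5380 then PySem.Int.mod x 1190 else x
      (x, y)) (x, y)
  s.1 + s.2 + 25

-- ===== PORT B =====
-- B: the modulo branch fires at most once; search for the first crossing index
-- (the for/break/else loop of Source B) and compute x in closed form from it.
def pvFindX (x0 : Int) : List Int → Int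
  | [] => x0 + 2160
  | i :: t =>
      let s := 9 * i * (i + 1)
      if x0 + s > 5380 then PySem.Int.mod (x0 + s) 1190 + (2160 - s)
      else pvFindX x0 t

def compute_3_8_alt (a : Int) (b : Int) (c : Int) : Int :=
  let x0 := a * 76 + b * 97
  let y := c * 76 - a * 113 - 2400
  let x := pvFindX x0 (PySem.List.pyRange 0 16 1)
  x + y + 25

-- ===== PRECONDITION & SPEC =====
def Spec_compute_3_8 (a : Int) (b : Int) (c : Int) (out : Int) : Prop := out = compute_3_8_alt a b c
instance (a : Int) (b : Int) (c : Int) (out : Int) : Decidable (Spec_compute_3_8 a b c out) := by unfold Spec_compute_3_8; infer_instance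

-- ===== CLAIM (what is proved, stated in full; the proofs are below) =====
def Claim_equal_compute_3_8 : Prop := ∀ (a : Int) (b : Int) (c : Int), Dom_compute_3_8 a b c → Spec_compute_3_8 a b c (compute_3_8 a b c)

-- ===== LEMMAS AND PROOFS =====

-- A's x-only fold (the x component of A's paired fold).
def pvFoldX (l : List Int) (x : Int) : Int :=
  l.foldl (fun x i =>
    let x := x + i * 18
    if x > 5380 then PySem.Int.mod x 1190 else x) x

-- A's paired fold splits: x component is pvFoldX, y subtracts 20 * sum.
theorem pv_fold_split (l : List Int) (x y : Int) :
    l.foldl (fun (s : Int × Int) i =>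
      let x := s.1 + i * 18
      let y := s.2 - i * 20
      let x := if x > 5380 then PySem.Int.mod x 1190 else x
      (x, y)) (x, y)
    = (pvFoldX l x, y - 20 * l.sum) := by
  induction l generalizing x y with
  | nil => simp [pvFoldX]
  | cons h t ih =>
      simp only [List.foldl_cons, List.sum_cons, pvFoldX, ih]
      exact congrArg₂ Prod.mk rfl (by ring)

-- once below the threshold for good, the fold is a plain sum
theorem pv_foldX_no_mod (l : List Int) (hL : ∀ i ∈ l, 0 ≤ i) :
    ∀ x : Int, 0 ≤ x → x + 18 * l.sum ≤ 5380 → pvFoldX l x = x + 18 * l.sum := by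
  induction l with
  | nil => intro x _ _; simp [pvFoldX]
  | cons h t ih =>
      intro x hx hb
      have hh : 0 ≤ h := hL h (by simp)
      have ht : 0 ≤ t.sum := List.sum_nonneg (fun i hi => hL i (by simp [hi]))
      have hle : ¬ (x + h * 18 > 5380) := by simp [List.sum_cons] at hb; omega
      simp only [pvFoldX, List.foldl_cons, if_neg hle]
      have := ih (fun i hi => hL i (by simp [hi])) (x + h * 18) (by omega)
        (by simp [List.sum_cons] at hb; omega)
      simp only [pvFoldX] at this
      rw [this]; simp [List.sum_cons]; ring

-- main invariant, downward over the remaining range [k, 16)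
theorem pv_main (n : Nat) (hn : n ≤ 16) :
    (∀ i ∈ PySem.List.pyRange (16 - (n : Int)) 16 1, 0 ≤ i) ∧
    18 * (PySem.List.pyRange (16 - (n : Int)) 16 1).sum
      = 2160 - 9 * ((16 - (n : Int)) - 1) * (16 - (n : Int)) ∧
    (∀ x0 : Int,
      pvFoldX (PySem.List.pyRange (16 - (n : Int)) 16 1)
        (x0 + 9 * ((16 - (n : Int)) - 1) * (16 - (n : Int)))
      = pvFindX x0 (PySem.List.pyRange (16 - (n : Int)) 16 1)) := by
  induction n with
  | zero =>
      simp only [Nat.cast_zero, sub_zero]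
      have he : PySem.List.pyRange 16 16 1 = [] := PySem.List.pyRange_one_eq_nil le_rfl
      refine ⟨?_, ?_, ?_⟩ <;> simp [he, pvFoldX, pvFindX]
  | succ m ih =>
      have hm : m ≤ 16 := by omega
      obtain ⟨ihN, ihS, ihF⟩ := ih hm
      set k : Int := 16 - ((m : Int) + 1) with hk
      have hk16 : k < 16 := by omega
      have hk0 : 0 ≤ k := by push_cast [hk]; omega
      have hsucc : (16 : Int) - (m : Int) = k + 1 := by push_cast [hk]; ring
      have hcons : PySem.List.pyRange k 16 1 = k :: PySem.List.pyRange (k + 1) 16 1 :=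
        PySem.List.pyRange_one_cons hk16
      rw [hsucc] at ihN ihS ihF
      have hknat : (16 : Int) - ((m : Nat) + 1 : Nat) = k := by push_cast [hk]; ring
      rw [hknat]
      refine ⟨?_, ?_, ?_⟩
      · rw [hcons]; intro i hi
        rcases List.mem_cons.mp hi with h | h
        · omega
        · exact ihN i h
      · rw [hcons]; simp only [List.sum_cons, mul_add]
        rw [show (18:Int) * (PySem.List.pyRange (k+1) 16 1).sum
              = 2160 - 9 * ((k+1) - 1) * (k+1) from ihS]
        ring
      · intro x0
        rw [hcons]
        simp only [pvFoldX, List.foldl_cons, pvFindX]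
        have harg : x0 + 9 * (k - 1) * k + k * 18 = x0 + 9 * k * (k + 1) := by ring
        rw [harg]
        by_cases hgt : x0 + 9 * k * (k + 1) > 5380
        · rw [if_pos hgt, if_pos hgt]
          have hmod : PySem.Int.mod (x0 + 9 * k * (k + 1)) 1190
              = (x0 + 9 * k * (k + 1)) % 1190 :=
            PySem.Int.mod_eq_emod_of_pos (by norm_num)
          have h0 : 0 ≤ (x0 + 9 * k * (k + 1)) % 1190 :=
            Int.emod_nonneg _ (by norm_num)
          have h1 : (x0 + 9 * k * (k + 1)) % 1190 < 1190 :=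
            Int.emod_lt_of_pos _ (by norm_num)
          have hkk : 0 ≤ 9 * k * (k + 1) := by positivity
          have ihS' : 18 * (PySem.List.pyRange (k+1) 16 1).sum = 2160 - 9 * k * (k + 1) := by
            rw [ihS]; ring
          have hfin := pv_foldX_no_mod (PySem.List.pyRange (k+1) 16 1) ihN
            ((x0 + 9 * k * (k + 1)) % 1190) h0 (by omega)
          simp only [pvFoldX] at hfin
          rw [hmod, hfin, ihS']
        · rw [if_neg hgt, if_neg hgt]
          have := ihF x0
          simp only [pvFoldX] at this
          rw [show x0 + 9 * k * (k + 1) = x0 + 9 * ((k+1) - 1) * (k+1) by ring]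
          exact this

-- ===== VERDICT (by name: the statement is the Claim_ definition above) =====
theorem compute_3_8_spec : Claim_equal_compute_3_8 := by
  intro a b c _
  have h := (pv_main 16 (le_refl 16)).2.2 (a * 76 + b * 97)
  have hsum : (PySem.List.pyRange 0 16 1).sum = 120 := by decide
  norm_num at h
  simp only [Spec_compute_3_8, compute_3_8, compute_3_8_alt, pv_fold_split, hsum, h]
  ring
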